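-- pv_equiv track=rewrite | github.com/LyrisX02/PEC-MDP | policy_to_pprops.py | find_minimal_discriminators
-- ===== SOURCE A (Python) =====
-- def find_minimal_discriminators(tuples):
--     if not tuples:
--         return {}
--
--     # Create a dictionary to store result
--     result = {}
--
--     # Get the length of tuples
--     tuple_len = len(tuples[0])
--
--     for current_tuple in tuples:
--         # Start with an empty discriminator
--         discriminator = {}
--
--         # Try adding one position at a time until we have a unique identifier
--         for position in range(tuple_len):
--             # Add this position to our discriminator
--             discriminator[position] = current_tuple[position]
--
--             # Check if this discriminator is unique
--             is_unique = True
--             for other_tuple in tuples: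
--                 if current_tuple == other_tuple:
--                     continue
--
--                 # Check if the other tuple matches our discriminator on all positions
--                 matches = True
--                 for pos, val in discriminator.items():
--                     if other_tuple[pos] != val:
--                         matches = False
--                         break
--
--                 if matches:
--                     is_unique = False
--                     break
--
--             if is_unique:
--                 # We found a minimal discriminator
--                 result[current_tuple] = discriminator
--                 break
--
--     return result.values()
-- ===== SOURCE B (Python) =====
-- def find_minimal_discriminators(tuples):
--     if not tuples:
--         return []
--     tuple_len = len(tuples[0])
--     # distinct tuples, first-occurrence order
--     order = list(dict.fromkeys(tuples))
--     # level-by-level prefix refinement: at level k, a pending tuple is discriminated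
--     # as soon as it is the only pending tuple with its length-k prefix
--     depth = {}
--     pending = order
--     k = 0
--     while pending and k < tuple_len:
--         k += 1
--         cnt = {}
--         for t in pending:
--             p = t[:k]
--             cnt[p] = cnt.get(p, 0) + 1
--         nxt = []
--         for t in pending:
--             if cnt[t[:k]] == 1:
--                 depth[t] = k
--             else:
--                 nxt.append(t)
--         pending = nxt
--     result = []
--     for t in order:
--         if t in depth:
--             result.append({i: t[i] for i in range(depth[t])})
--     return result
-- ===== Notes on version B (the rewrite author's own statement) =====
-- stated objective: faster
-- what changed: Instead of A's per-tuple rescan of all tuples for every discriminator length, B dedups the tuples once and refines them level by level (trie levels): at level k it counts pending tuples per length-k prefix and discriminates exactly the tuples whose count is 1.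
-- outside the precondition, e.g. on find_minimal_discriminators([]): A returns {}, B returns []; on find_minimal_discriminators([(1, 2), (2,)]): A returns [{0: 1}, {0: 2}], B returns [{0: 1}, {0: 2}]
import Mathlib
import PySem

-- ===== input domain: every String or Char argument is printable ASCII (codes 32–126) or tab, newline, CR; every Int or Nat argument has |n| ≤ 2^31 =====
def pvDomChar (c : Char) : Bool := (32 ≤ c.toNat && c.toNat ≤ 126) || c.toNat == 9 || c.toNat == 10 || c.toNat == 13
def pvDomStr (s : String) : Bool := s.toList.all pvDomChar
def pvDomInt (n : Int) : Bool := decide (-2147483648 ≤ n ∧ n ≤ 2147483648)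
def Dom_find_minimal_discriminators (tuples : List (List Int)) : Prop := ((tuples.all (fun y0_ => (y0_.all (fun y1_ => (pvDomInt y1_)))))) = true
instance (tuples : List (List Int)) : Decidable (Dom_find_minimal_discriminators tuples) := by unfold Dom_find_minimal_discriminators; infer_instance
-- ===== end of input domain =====

-- B replaces A's per-tuple rescan of all tuples by a level-by-level prefix refinement over the
-- deduplicated tuples (a trie-level search); equivalence is proved on non-empty lists whose
-- tuples are at least as long as the first.


-- ===== PORT A =====
-- 'matches': the other tuple agrees with the discriminator on every recorded position
def pvAMatches (disc : PySem.Dict Int Int) (other : List Int) : Bool :=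
  disc.items.all (fun pv => PySem.List.pyGetD other pv.1 0 == pv.2)

-- inner 'for other_tuple in tuples' loop with its early break
def pvAIsUnique (tuples : List (List Int)) (current : List Int) (disc : PySem.Dict Int Int) : Bool :=
  tuples.all (fun other => current == other || !(pvAMatches disc other))

-- 'for position in range(tuple_len)' loop; fuel = remaining positions
-- (indexing uses pyGetD with default 0: inside Pre_ every index is in range)
def pvALoop (tuples : List (List Int)) (current : List Int) :
    Nat → Int → PySem.Dict Int Int → Option (PySem.Dict Int Int)
  | 0, _, _ => none
  | r + 1, position, disc =>
      let disc' := disc.insert position (PySem.List.pyGetD current position 0)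
      if pvAIsUnique tuples current disc' then some disc'
      else pvALoop tuples current r (position + 1) disc'

def find_minimal_discriminators (tuples : List (List Int)) : List (List (Int × Int)) :=
  if tuples = [] then []
  else
    let tupleLen := (tuples.headD []).length
    let result := tuples.foldl
      (fun (result : PySem.Dict (List Int) (List (Int × Int))) current =>
        match pvALoop tuples current tupleLen 0 PySem.Dict.empty with
        | some disc => result.insert current disc.items
        | none => result)
      PySem.Dict.empty
    result.values

-- ===== PORT B =====
-- cnt: how many pending tuples carry each length-k prefix ('cnt[p] = cnt.get(p, 0) + 1')
def pvBLevelCnt (pending : List (List Int)) (k : Nat) : PySem.Dict (List Int) Int :=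
  pending.foldl (fun cnt t => cnt.insert (t.take k) (cnt.getD (t.take k) 0 + 1)) PySem.Dict.empty

-- the while loop: at level k+1, a pending tuple whose prefix count is 1 is recorded in depth,
-- the others stay pending ('depth[t] = k' / 'nxt.append(t)'); fuel = tuple_len - k
def pvBLoop (fuel : Nat) (k : Nat) (pending : List (List Int))
    (depth : PySem.Dict (List Int) Int) : PySem.Dict (List Int) Int :=
  match fuel with
  | 0 => depth
  | fuel + 1 =>
      if pending = [] then depth
      else
        let cnt := pvBLevelCnt pending (k + 1)
        let step := pending.foldl
          (fun (dn : PySem.Dict (List Int) Int × List (List Int)) t =>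
            if cnt.getD (t.take (k + 1)) 0 == 1 then (dn.1.insert t ((k + 1 : Nat) : Int), dn.2)
            else (dn.1, dn.2 ++ [t]))
          (depth, [])
        pvBLoop fuel (k + 1) step.2 step.1

def find_minimal_discriminators_alt (tuples : List (List Int)) : List (List (Int × Int)) :=
  if tuples = [] then []
  else
    let L := (tuples.headD []).length
    let order := PySem.List.dedup tuples
    let depth := pvBLoop L 0 order PySem.Dict.empty
    order.foldl (fun res t =>
      match depth.get? t with
      | some k => res ++ [(List.range k.toNat).map (fun i => ((i : Int), PySem.List.pyGetD t (i : Int) 0))]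
      | none => res) []

-- ===== PRECONDITION & SPEC =====
-- Pre_ excludes the empty list (A returns the dict {} there, not a list of dicts) and inputs
-- containing a tuple shorter than the first one: there A indexes every tuple at positions taken
-- from the first tuple and can raise IndexError (B can raise there too; where A happens to
-- return on such inputs the two agree on all tested inputs, but that corner is not claimed).
def Pre_find_minimal_discriminators (tuples : List (List Int)) : Prop :=
  tuples ≠ [] ∧ ∀ t ∈ tuples, (tuples.headD []).length ≤ t.length

instance (tuples : List (List Int)) : Decidable (Pre_find_minimal_discriminators tuples) := by
  unfold Pre_find_minimal_discriminators; infer_instance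

def pvWitness_find_minimal_discriminators : List (List Int) := [[1, 2], [1, 3], [2, 2]]

def Spec_find_minimal_discriminators (tuples : List (List Int)) (out : List (List (Int × Int))) : Prop := out = find_minimal_discriminators_alt tuples
instance (tuples : List (List Int)) (out : List (List (Int × Int))) : Decidable (Spec_find_minimal_discriminators tuples out) := by unfold Spec_find_minimal_discriminators; infer_instance

-- ===== CLAIM (what is proved, stated in full; the proofs are below) =====
def Claim_equal_find_minimal_discriminators : Prop := ∀ (tuples : List (List Int)), Dom_find_minimal_discriminators tuples → Pre_find_minimal_discriminators tuples → Spec_find_minimal_discriminators tuples (find_minimal_discriminators tuples)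

-- ===== LEMMAS AND PROOFS =====

-- the items of A's discriminator dict after recording positions 0..n-1 of t
def pvDiscItems (t : List Int) (n : Nat) : List (Int × Int) :=
  (List.range n).map (fun i => ((i : Int), PySem.List.pyGetD t (i : Int) 0))

-- 't has a unique length-k prefix among the distinct tuples'
def pvP (order : List (List Int)) (t : List Int) (k : Nat) : Bool :=
  order.countP (fun u => u.take k == t.take k) == 1

-- the common specification of both searches: the first k in [s, s+fuel) with a unique prefix
def pvSearch (order : List (List Int)) (t : List Int) : Nat → Nat → Option Nat
  | 0, _ => none
  | r + 1, s => if pvP order t s then some s else pvSearch order t r (s + 1)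

lemma pvDiscItems_succ (t : List Int) (n : Nat) :
    pvDiscItems t (n + 1) = pvDiscItems t n ++ [((n : Int), PySem.List.pyGetD t (n : Int) 0)] := by
  simp [pvDiscItems, List.range_succ]

lemma take_eq_iff (u t : List Int) (k : Nat) (hu : k ≤ u.length) (ht : k ≤ t.length) :
    (∀ i < k, u.getD i 0 = t.getD i 0) ↔ u.take k = t.take k := by
  constructor
  · intro h
    apply List.ext_getElem
    · simp; omega
    · intro i h1 h2
      have hi : i < k := by simp at h1; omega
      have hiu : i < u.length := by omega
      have hit : i < t.length := by omega
      have := h i hi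
      simpa [List.getElem_take, List.getD_eq_getElem, hiu, hit] using this
  · intro h i hi
    have hiu : i < u.length := by omega
    have hit : i < t.length := by omega
    have h1 : (u.take k)[i]'(by simp; omega) = (t.take k)[i]'(by simp; omega) := by
      simp only [h]
    simpa [List.getElem_take, List.getD_eq_getElem, hiu, hit] using h1

lemma pvAMatches_eq (t u : List Int) (k : Nat) (disc : PySem.Dict Int Int)
    (hd : disc.items = pvDiscItems t k)
    (hku : k ≤ u.length) (hkt : k ≤ t.length) :
    pvAMatches disc u = (u.take k == t.take k) := by
  have h1 : pvAMatches disc u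
      = (List.range k).all
          (fun i => PySem.List.pyGetD u (i : Int) 0 == PySem.List.pyGetD t (i : Int) 0) := by
    simp [pvAMatches, hd, pvDiscItems, List.all_map, Function.comp]
  rw [h1, Bool.eq_iff_iff]
  simp only [List.all_eq_true, List.mem_range, PySem.List.pyGetD_natCast, beq_iff_eq]
  exact take_eq_iff u t k hku hkt

lemma map_fst_filterMap_sublist {α β : Type} (g : α → Option β) :
    ∀ l : List α,
      ((l.filterMap (fun t => (g t).map (fun v => (t, v)))).map Prod.fst).Sublist l
  | [] => by simp
  | a :: l => by
    cases hga : g a with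
    | none =>
        simp only [List.filterMap_cons, hga, Option.map_none]
        exact (map_fst_filterMap_sublist g l).cons a
    | some v =>
        simp only [List.filterMap_cons, hga, Option.map_some, List.map_cons]
        exact (map_fst_filterMap_sublist g l).cons₂ a

lemma countP_eq_one_iff {α : Type} (l : List α) (p : α → Bool) (t : α) (hnd : l.Nodup)
    (htl : t ∈ l) (hpt : p t = true) :
    (l.countP p = 1) ↔ ∀ u ∈ l, p u = true → u = t := by
  rw [List.countP_eq_length_filter]
  constructor
  · intro h u hu hpu
    obtain ⟨a, ha⟩ := List.length_eq_one_iff.mp h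
    have h1 : t ∈ l.filter p := List.mem_filter.mpr ⟨htl, hpt⟩
    have h2 : u ∈ l.filter p := List.mem_filter.mpr ⟨hu, hpu⟩
    rw [ha] at h1 h2
    simp at h1 h2
    rw [h2, h1]
  · intro h
    have hall : ∀ u ∈ l.filter p, u = t := by
      intro u hu
      have := List.mem_filter.mp hu
      exact h u this.1 this.2
    have h1 : t ∈ l.filter p := List.mem_filter.mpr ⟨htl, hpt⟩
    have hnd' : (l.filter p).Nodup := hnd.filter p
    cases hfl : l.filter p with
    | nil => rw [hfl] at h1; simp at h1
    | cons a as =>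
        have hat : a = t := hall a (by rw [hfl]; exact List.mem_cons_self)
        have has : as = [] := by
          rw [hfl] at hnd' hall
          rcases List.eq_nil_or_concat as with h' | ⟨bs, b, hb⟩
          · exact h'
          · exfalso
            have hb' : b ∈ as := by rw [hb]; simp
            have hbt : b = t := hall b (List.mem_cons_of_mem a hb')
            have hna : a ∉ as := (List.nodup_cons.mp hnd').1
            apply hna
            rw [hat, ← hbt]
            exact hb'
        simp [has]

-- the two guards agree: A's uniqueness scan over all tuples = the prefix count being 1
lemma guard_eq (tuples : List (List Int)) (t : List Int) (k : Nat) (disc : PySem.Dict Int Int)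
    (hPre : ∀ u ∈ tuples, (tuples.headD []).length ≤ u.length)
    (ht : t ∈ tuples) (_hk1 : 1 ≤ k) (hkL : k ≤ (tuples.headD []).length)
    (hd : disc.items = pvDiscItems t k) :
    pvAIsUnique tuples t disc = pvP (PySem.List.dedup tuples) t k := by
  have hLt : (tuples.headD []).length ≤ t.length := hPre t ht
  have hmem_order : ∀ u, u ∈ PySem.List.dedup tuples ↔ u ∈ tuples := by
    intro u; rw [PySem.List.dedup_eq_ofList]; exact PySem.Set.mem_ofList tuples u
  have htord : t ∈ PySem.List.dedup tuples := (hmem_order t).mpr ht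
  have hnd : (PySem.List.dedup tuples).Nodup := by
    rw [PySem.List.dedup_eq_ofList]; exact PySem.Set.nodup_ofList tuples
  have hpt : (fun u => u.take k == t.take k) t = true := by simp
  have hiff := countP_eq_one_iff (PySem.List.dedup tuples)
      (fun u => u.take k == t.take k) t hnd htord hpt
  rw [Bool.eq_iff_iff]
  unfold pvP
  rw [beq_iff_eq]
  constructor
  · intro hA
    apply hiff.mpr
    intro u hu hpu
    have hu' : u ∈ tuples := (hmem_order u).mp hu
    have hAu : ∀ x ∈ tuples, t = x ∨ pvAMatches disc x = false := by
      simpa [pvAIsUnique] using hA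
    rcases hAu u hu' with h | h
    · exact h.symm
    · rw [pvAMatches_eq t u k disc hd (by have := hPre u hu'; omega) (by omega)] at h
      simp only [beq_iff_eq] at hpu
      simp [hpu] at h
  · intro hB
    have huniq := hiff.mp hB
    simp only [pvAIsUnique, List.all_eq_true]
    intro u hu
    simp only [Bool.or_eq_true, beq_iff_eq, Bool.not_eq_true']
    by_cases hut : t = u
    · left; exact hut
    · right
      rw [pvAMatches_eq t u k disc hd (by have := hPre u hu; omega) (by omega)]
      by_contra hcontra
      simp only [Bool.not_eq_false, beq_iff_eq] at hcontra
      exact hut ((huniq u ((hmem_order u).mpr hu) (by simp [hcontra])).symm)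

lemma pvALoop_contains_aux (t : List Int) (n : Nat) (disc : PySem.Dict Int Int)
    (hd : disc.items = pvDiscItems t n) : disc.contains ((n : Nat) : Int) = false := by
  rw [PySem.Dict.contains_eq_decide_mem_keys]
  simp only [decide_eq_false_iff_not]
  intro hmem
  have h2 : ((n : Nat) : Int) ∈ (pvDiscItems t n).map Prod.fst := by rw [← hd]; exact hmem
  rw [List.mem_map] at h2
  obtain ⟨pr, hpr, he⟩ := h2
  simp [pvDiscItems] at hpr
  obtain ⟨i, hi, hpe⟩ := hpr
  rw [← hpe] at he
  have hin : i = n := by simpa using he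
  omega

-- A's inner search returns the discriminator of the first k with a unique prefix
lemma loops_agree (tuples : List (List Int)) (t : List Int) (L : Nat)
    (hg : ∀ (k : Nat) (disc : PySem.Dict Int Int), 1 ≤ k → k ≤ L →
        disc.items = pvDiscItems t k →
        pvAIsUnique tuples t disc = pvP (PySem.List.dedup tuples) t k) :
    ∀ (r n : Nat) (disc : PySem.Dict Int Int), n + r = L → disc.items = pvDiscItems t n →
      (pvALoop tuples t r ((n : Nat) : Int) disc).map PySem.Dict.items
        = (pvSearch (PySem.List.dedup tuples) t r (n + 1)).map (pvDiscItems t) := by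
  intro r
  induction r with
  | zero => intro n disc _ _; rfl
  | succ r ih =>
      intro n disc hnr hd
      have hcf : disc.contains ((n : Nat) : Int) = false := pvALoop_contains_aux t n disc hd
      have hd' : (disc.insert ((n : Nat) : Int) (PySem.List.pyGetD t ((n : Nat) : Int) 0)).items
          = pvDiscItems t (n + 1) := by
        rw [PySem.Dict.items_insert_of_not_contains disc _ hcf, hd, pvDiscItems_succ]
      have hguard := hg (n + 1) _ (by omega) (by omega) hd'
      simp only [pvALoop, pvSearch]
      rw [hguard]
      by_cases hc : pvP (PySem.List.dedup tuples) t (n + 1) = true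
      · simp only [hc, if_true, Option.map_some]
        rw [hd']
      · simp only [Bool.not_eq_true] at hc
        simp only [hc, Bool.false_eq_true, if_false]
        have harg : ((n : Nat) : Int) + 1 = (((n + 1 : Nat) : Nat) : Int) := by push_cast; ring
        rw [harg]
        exact ih (n + 1) _ (by omega) hd'

-- A's result-dict loop, characterised: items = first-occurrence dedup, filtered by success
lemma items_foldl_result (g : List Int → Option (List (Int × Int))) (xs : List (List Int)) :
    (xs.foldl (fun (res : PySem.Dict (List Int) (List (Int × Int))) cur =>
        match g cur with
        | some v => res.insert cur v
        | none => res) PySem.Dict.empty).items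
      = (PySem.Set.ofList xs).filterMap (fun t => (g t).map (fun v => (t, v))) := by
  induction xs using List.reverseRecOn with
  | nil => simp [PySem.Dict.empty]
  | append_singleton xs x ih =>
      rw [List.foldl_append, PySem.Set.ofList_append_singleton]
      set d := xs.foldl (fun (res : PySem.Dict (List Int) (List (Int × Int))) cur =>
        match g cur with
        | some v => res.insert cur v
        | none => res) PySem.Dict.empty with hdd
      simp only [List.foldl_cons, List.foldl_nil]
      have hkeys : ∀ y ∈ d.items.map Prod.fst, y ∈ xs := by
        intro y hy
        rw [ih] at hy
        have hsub := map_fst_filterMap_sublist g (PySem.Set.ofList xs)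
        have : y ∈ PySem.Set.ofList xs := hsub.mem hy
        exact (PySem.Set.mem_ofList xs y).mp this
      by_cases hx : x ∈ xs
      · rw [PySem.Set.add_of_mem ((PySem.Set.mem_ofList xs x).mpr hx)]
        cases hgx : g x with
        | none => simp only [ih]
        | some v =>
            have hmemi : (x, v) ∈ d.items := by
              rw [ih]
              exact List.mem_filterMap.mpr ⟨x, (PySem.Set.mem_ofList xs x).mpr hx, by simp [hgx]⟩
            have hcont : d.contains x = true := by
              rw [PySem.Dict.contains_eq_decide_mem_keys]
              simp only [decide_eq_true_eq]
              exact List.mem_map.mpr ⟨(x, v), hmemi, rfl⟩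
            rw [PySem.Dict.items_insert_of_contains d v hcont]
            have hndk : (d.items.map Prod.fst).Nodup := by
              rw [ih]
              exact (map_fst_filterMap_sublist g (PySem.Set.ofList xs)).nodup
                (PySem.Set.nodup_ofList xs)
            have : ∀ p ∈ d.items, (if (p.1 == x) = true then (x, v) else p) = p := by
              intro p hp
              by_cases hpx : p.1 = x
              · have : p = (x, v) :=
                  List.inj_on_of_nodup_map hndk hp hmemi (by simp [hpx])
                simp [this]
              · simp [hpx]
            rw [List.map_congr_left this, List.map_id', ih]
      · rw [PySem.Set.add_of_not_mem (fun hc => hx ((PySem.Set.mem_ofList xs x).mp hc))]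
        have hcont : d.contains x = false := by
          rw [PySem.Dict.contains_eq_decide_mem_keys]
          simp only [decide_eq_false_iff_not]
          intro hc
          exact hx (hkeys x hc)
        cases hgx : g x with
        | none => simp only [ih, List.filterMap_append, List.filterMap_cons, hgx,
            Option.map_none, List.filterMap_nil, List.append_nil]
        | some v =>
            rw [PySem.Dict.items_insert_of_not_contains d v hcont, ih]
            simp [List.filterMap_append, hgx]

-- ===== lemmas about B's level loop =====

lemma pvSearch_snoc (order : List (List Int)) (t : List Int) :
    ∀ (r s : Nat), pvSearch order t (r + 1) s
      = (match pvSearch order t r s with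
         | some j => some j
         | none => if pvP order t (s + r) then some (s + r) else none) := by
  intro r
  induction r with
  | zero => intro s; simp [pvSearch]
  | succ r ih =>
      intro s
      show (if pvP order t s then some s else pvSearch order t (r + 1) (s + 1)) = _
      rw [ih (s + 1)]
      by_cases hs : pvP order t s = true
      · simp [pvSearch, hs]
      · simp only [Bool.not_eq_true] at hs
        simp only [pvSearch, hs, Bool.false_eq_true, if_false]
        have : s + 1 + r = s + (r + 1) := by omega
        rw [this]

lemma pvSearch_eq_none_iff (order : List (List Int)) (t : List Int) :
    ∀ (r s : Nat), pvSearch order t r s = none ↔ ∀ j, s ≤ j → j < s + r → pvP order t j = false := by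
  intro r
  induction r with
  | zero => intro s; simp [pvSearch]; omega
  | succ r ih =>
      intro s
      show (if pvP order t s then some s else pvSearch order t r (s + 1)) = none ↔ _
      by_cases hs : pvP order t s = true
      · simp only [hs, if_true]
        constructor
        · intro h; simp at h
        · intro h
          have := h s (by omega) (by omega)
          rw [hs] at this
          simp at this
      · simp only [Bool.not_eq_true] at hs
        simp only [hs, Bool.false_eq_true, if_false, ih (s + 1)]
        constructor
        · intro h j h1 h2
          by_cases hjs : j = s
          · rw [hjs]; exact hs
          · exact h j (by omega) (by omega)
        · intro h j h1 h2
          exact h j (by omega) (by omega)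

lemma pvSearch_extend (order : List (List Int)) (t : List Int) :
    ∀ (r r' s : Nat) (j : Nat), pvSearch order t r s = some j →
      pvSearch order t (r + r') s = some j := by
  intro r
  induction r with
  | zero => intro r' s j h; simp [pvSearch] at h
  | succ r ih =>
      intro r' s j h
      rw [show r + 1 + r' = (r + r') + 1 from by omega]
      show (if pvP order t s then some s else pvSearch order t (r + r') (s + 1)) = some j
      revert h
      show (if pvP order t s then some s else pvSearch order t r (s + 1)) = some j → _
      by_cases hs : pvP order t s = true
      · simp [hs]
      · simp only [Bool.not_eq_true] at hs
        simp only [hs, Bool.false_eq_true, if_false]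
        exact ih r' (s + 1) j

lemma get?_foldl_insert_const (xs : List (List Int)) (v : Int)
    (d : PySem.Dict (List Int) Int) (t : List Int) :
    (xs.foldl (fun d x => d.insert x v) d).get? t = if t ∈ xs then some v else d.get? t := by
  induction xs generalizing d with
  | nil => simp
  | cons x xs ih =>
      simp only [List.foldl_cons, ih, List.mem_cons]
      by_cases htx : t = x
      · by_cases hxs : t ∈ xs
        · simp [htx]
        · simp [htx]
      · by_cases hxs : t ∈ xs
        · simp [hxs, htx]
        · simp [hxs, htx, PySem.Dict.get?_insert]

lemma pvBLevelCnt_getD (pending : List (List Int)) (k : Nat) (p : List Int) :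
    (pvBLevelCnt pending k).getD p 0 = ((pending.countP (fun u => u.take k == p) : Nat) : Int) := by
  unfold pvBLevelCnt
  have h : pending.foldl
        (fun (cnt : PySem.Dict (List Int) Int) t => cnt.insert (t.take k) (cnt.getD (t.take k) 0 + 1))
        PySem.Dict.empty
      = (pending.map (fun t => t.take k)).foldl
          (fun (d : PySem.Dict (List Int) Int) x => d.insert x (d.getD x 0 + 1)) PySem.Dict.empty := by
    rw [List.foldl_map]
  rw [h, PySem.Dict.getD_foldl_insert_add_one]
  rw [List.count_eq_countP, List.countP_map]
  simp [Function.comp_def]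

-- tuples already discriminated at an earlier level share no prefix with a pending tuple,
-- so counting within pending equals counting within order
lemma countP_pending_eq (order : List (List Int)) (k : Nat) (t : List Int)
    (ht : t ∈ order.filter (fun u => (List.range k).all (fun j => !pvP order u (j + 1)))) :
    (order.filter (fun u => (List.range k).all (fun j => !pvP order u (j + 1)))).countP
        (fun u => u.take (k + 1) == t.take (k + 1))
      = order.countP (fun u => u.take (k + 1) == t.take (k + 1)) := by
  rw [List.countP_filter]
  apply List.countP_congr
  intro u hu
  constructor
  · intro h
    exact (Bool.and_eq_true _ _).mp h |>.1
  · intro hp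
    apply (Bool.and_eq_true _ _).mpr
    refine ⟨hp, ?_⟩
    -- u's prefixes up to k are t's prefixes, so u is as undiscriminated as t
    have hqt : (List.range k).all (fun j => !pvP order t (j + 1)) = true :=
      (List.mem_filter.mp ht).2
    simp only [List.all_eq_true, List.mem_range, Bool.not_eq_true'] at hqt ⊢
    intro j hj
    have hpref : u.take (j + 1) = t.take (j + 1) := by
      have h1 : u.take (j + 1) = (u.take (k + 1)).take (j + 1) := by
        rw [List.take_take]
        congr 1
        omega
      have h2 : t.take (j + 1) = (t.take (k + 1)).take (j + 1) := by
        rw [List.take_take]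
        congr 1
        omega
      rw [h1, h2]
      simp only [beq_iff_eq] at hp
      rw [hp]
    have : pvP order u (j + 1) = pvP order t (j + 1) := by
      unfold pvP
      congr 1
      apply List.countP_congr
      intro v _
      rw [hpref]
    rw [this]
    exact hqt j hj

-- B's single-pass split ('depth[t] = k' / 'nxt.append(t)') as a filter pair
lemma foldl_split_pair (b : List Int → Bool) (v : Int) :
    ∀ (xs : List (List Int)) (d : PySem.Dict (List Int) Int) (acc : List (List Int)),
      xs.foldl (fun dn u => if b u then (dn.1.insert u v, dn.2) else (dn.1, dn.2 ++ [u])) (d, acc)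
        = ((xs.filter b).foldl (fun d u => d.insert u v) d, acc ++ xs.filter (fun u => !b u))
  | [], d, acc => by simp
  | x :: xs, d, acc => by
      by_cases hb : b x = true
      · simp only [List.foldl_cons, hb, if_true]
        rw [foldl_split_pair b v xs (d.insert x v) acc]
        simp [hb]
      · simp only [Bool.not_eq_true] at hb
        simp only [List.foldl_cons, hb, Bool.false_eq_true, if_false]
        rw [foldl_split_pair b v xs d (acc ++ [x])]
        simp [hb]

-- the level loop computes, for every distinct tuple, the first level with a unique prefix
lemma pvBLoop_get? (order : List (List Int)) :
    ∀ (fuel k : Nat) (depth : PySem.Dict (List Int) Int),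
      (∀ t ∈ order, depth.get? t = (pvSearch order t k 1).map (fun j => ((j : Nat) : Int))) →
      ∀ t ∈ order,
        (pvBLoop fuel k (order.filter (fun u => (List.range k).all (fun j => !pvP order u (j + 1)))) depth).get? t
          = (pvSearch order t (k + fuel) 1).map (fun j => ((j : Nat) : Int)) := by
  intro fuel
  induction fuel with
  | zero => intro k depth hdepth t ht; exact hdepth t ht
  | succ fuel ih =>
      intro k depth hdepth t ht
      set q : List Int → Bool := fun u => (List.range k).all (fun j => !pvP order u (j + 1)) with hq
      set pending := order.filter q with hpending
      -- q u = true ↔ pvSearch order u k 1 = none (for u ∈ order)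
      have hqnone : ∀ u, q u = true ↔ pvSearch order u k 1 = none := by
        intro u
        rw [pvSearch_eq_none_iff]
        simp only [hq, List.all_eq_true, List.mem_range, Bool.not_eq_true']
        constructor
        · intro h j h1 h2
          have := h (j - 1) (by omega)
          rwa [show j - 1 + 1 = j from by omega] at this
        · intro h j hj
          exact h (j + 1) (by omega) (by omega)
      show (pvBLoop (fuel + 1) k pending depth).get? t = _
      rw [pvBLoop]
      by_cases hpe : pending = []
      · rw [if_pos hpe]
        -- everything already discriminated: the search succeeded within the first k levels
        have hqt : q t = false := by
          by_contra hqt'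
          simp only [Bool.not_eq_false] at hqt'
          have : t ∈ pending := List.mem_filter.mpr ⟨ht, hqt'⟩
          rw [hpe] at this
          simp at this
        cases hs : pvSearch order t k 1 with
        | none =>
            rw [← hqnone t] at hs
            rw [hs] at hqt
            simp at hqt
        | some j =>
            rw [pvSearch_extend order t k (fuel + 1) 1 j hs]
            have := hdepth t ht
            rw [hs] at this
            rw [this]
      · rw [if_neg hpe]
        simp only []
        -- one refinement level: characterise the two accumulators of the split fold
        set cnt := pvBLevelCnt pending (k + 1) with hcnt
        -- the guard of the fold, on pending members, is pvP at level k+1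
        have hcP : ∀ u ∈ pending, (cnt.getD (u.take (k + 1)) 0 == 1) = pvP order u (k + 1) := by
          intro u hu
          rw [hcnt, pvBLevelCnt_getD, hpending, countP_pending_eq order k u hu]
          unfold pvP
          rw [Bool.eq_iff_iff, beq_iff_eq, beq_iff_eq]
          constructor
          · intro h; exact_mod_cast h
          · intro h; exact_mod_cast h
        rw [foldl_split_pair (fun u => cnt.getD (u.take (k + 1)) 0 == 1) ((k + 1 : Nat) : Int)
          pending depth []]
        simp only [List.nil_append]
        -- the new pending list is the level-(k+1) filter over order
        have hnewpend : pending.filter (fun u => !(cnt.getD (u.take (k + 1)) 0 == 1))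
            = order.filter (fun u => (List.range (k + 1)).all (fun j => !pvP order u (j + 1))) := by
          rw [hpending, List.filter_filter]
          apply List.filter_congr
          intro u hu
          rw [Bool.eq_iff_iff]
          simp only [Bool.and_eq_true, List.all_eq_true, List.mem_range, Bool.not_eq_true']
          constructor
          · rintro ⟨hcu, hqu⟩
            intro j hj
            by_cases hjk : j = k
            · subst hjk
              have := hcP u (List.mem_filter.mpr ⟨hu, hqu⟩)
              rw [← this]
              exact hcu
            · have hq' := hqu
              simp only [hq, List.all_eq_true, List.mem_range, Bool.not_eq_true'] at hq'
              exact hq' j (by omega)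
          · intro hall
            have hqu : q u = true := by
              simp only [hq, List.all_eq_true, List.mem_range, Bool.not_eq_true']
              intro j hj
              exact hall j (by omega)
            refine ⟨?_, hqu⟩
            have := hcP u (List.mem_filter.mpr ⟨hu, hqu⟩)
            rw [this]
            exact hall k (by omega)
        -- the new depth dict satisfies the invariant one level further
        have hdepth' : ∀ u ∈ order,
            ((pending.filter (fun u => cnt.getD (u.take (k + 1)) 0 == 1)).foldl
                (fun d u => d.insert u ((k + 1 : Nat) : Int)) depth).get? u
              = (pvSearch order u (k + 1) 1).map (fun j => ((j : Nat) : Int)) := by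
          intro u hu
          rw [get?_foldl_insert_const, pvSearch_snoc order u k 1]
          cases hs : pvSearch order u k 1 with
          | some j =>
              have hqu : q u = false := by
                by_contra hqu'
                simp only [Bool.not_eq_false] at hqu'
                rw [hqnone u] at hqu'
                rw [hqu'] at hs
                simp at hs
              have hnp : u ∉ pending.filter (fun u => cnt.getD (u.take (k + 1)) 0 == 1) := by
                intro hmem
                have h1 : u ∈ pending := (List.mem_filter.mp hmem).1
                have h2 : q u = true := (List.mem_filter.mp h1).2
                rw [h2] at hqu
                simp at hqu
              rw [if_neg hnp, hdepth u hu, hs]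
          | none =>
              have hqu : q u = true := (hqnone u).mpr hs
              have hup : u ∈ pending := List.mem_filter.mpr ⟨hu, hqu⟩
              have hcu : (cnt.getD (u.take (k + 1)) 0 == 1) = pvP order u (k + 1) := hcP u hup
              by_cases hP : pvP order u (k + 1) = true
              · have : u ∈ pending.filter (fun u => cnt.getD (u.take (k + 1)) 0 == 1) :=
                  List.mem_filter.mpr ⟨hup, by rw [hcu]; exact hP⟩
                rw [if_pos this]
                rw [show 1 + k = k + 1 from by omega, hP]
                simp
              · simp only [Bool.not_eq_true] at hP
                have hnp : u ∉ pending.filter (fun u => cnt.getD (u.take (k + 1)) 0 == 1) := by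
                  intro hmem
                  have := (List.mem_filter.mp hmem).2
                  rw [hcu, hP] at this
                  simp at this
                rw [if_neg hnp, hdepth u hu, hs]
                rw [show 1 + k = k + 1 from by omega, hP]
                simp
        rw [hnewpend]
        have := ih (k + 1)
            ((pending.filter (fun u => cnt.getD (u.take (k + 1)) 0 == 1)).foldl
              (fun d u => d.insert u ((k + 1 : Nat) : Int)) depth)
            hdepth' t ht
        rw [show k + (fuel + 1) = (k + 1) + fuel from by omega]
        exact this

lemma b_fold_eq (g : List Int → Option (List (Int × Int))) (order : List (List Int)) :
    order.foldl (fun res t =>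
        match g t with
        | some d => res ++ [d]
        | none => res) []
      = order.filterMap g := by
  have hpt : ∀ (res : List (List (Int × Int))), ∀ t ∈ order,
      (match g t with
       | some d => res ++ [d]
       | none => res) = res ++ (g t).toList := by
    intro res t _
    cases g t <;> simp
  rw [PySem.List.foldl_congr_mem _ _ _ _ hpt, PySem.List.foldl_append_eq_flatMap]
  rw [← List.filterMap_eq_flatMap_toList]
  simp

-- ===== VERDICT (by name: the statement is the Claim_ definition above) =====
theorem find_minimal_discriminators_spec : Claim_equal_find_minimal_discriminators := by
  intro tuples _ hPre
  obtain ⟨hnil, hPre⟩ := hPre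
  unfold Spec_find_minimal_discriminators
  unfold find_minimal_discriminators find_minimal_discriminators_alt
  rw [if_neg hnil, if_neg hnil]
  set L := (tuples.headD []).length with hL
  set order := PySem.List.dedup tuples with horder
  set g : List Int → Option (List (Int × Int)) :=
    fun t => (pvSearch order t L 1).map (pvDiscItems t) with hg
  -- A's inner loop computes g
  have hpt : ∀ cur ∈ tuples,
      (pvALoop tuples cur L 0 PySem.Dict.empty).map PySem.Dict.items = g cur := by
    intro cur hcur
    have := loops_agree tuples cur L
        (fun k disc hk1 hkL hd => guard_eq tuples cur k disc hPre hcur hk1 hkL hd)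
        L 0 PySem.Dict.empty (by omega) (by simp [pvDiscItems, PySem.Dict.empty])
    simpa using this
  -- B's depth dict computes the same first level
  have hdepth0 : ∀ t ∈ order, (PySem.Dict.empty : PySem.Dict (List Int) Int).get? t
      = (pvSearch order t 0 1).map (fun j => ((j : Nat) : Int)) := by
    intro t _
    simp [pvSearch, PySem.Dict.get?_empty]
  have hfilter0 : order = order.filter (fun u => (List.range 0).all (fun j => !pvP order u (j + 1))) := by
    simp
  have hB : ∀ t ∈ order, (pvBLoop L 0 order PySem.Dict.empty).get? t
      = (pvSearch order t L 1).map (fun j => ((j : Nat) : Int)) := by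
    intro t ht
    have := pvBLoop_get? order L 0 PySem.Dict.empty hdepth0 t ht
    rw [← hfilter0] at this
    simpa using this
  -- rewrite A's fold body through hpt
  have hbody : tuples.foldl
      (fun (result : PySem.Dict (List Int) (List (Int × Int))) current =>
        match pvALoop tuples current L 0 PySem.Dict.empty with
        | some disc => result.insert current disc.items
        | none => result) PySem.Dict.empty
    = tuples.foldl
      (fun (result : PySem.Dict (List Int) (List (Int × Int))) current =>
        match g current with
        | some v => result.insert current v
        | none => result) PySem.Dict.empty := by
    apply PySem.List.foldl_congr_mem
    intro acc cur hcur
    have h := hpt cur hcur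
    cases hA : pvALoop tuples cur L 0 PySem.Dict.empty with
    | none => rw [hA] at h; simp only [Option.map_none] at h; rw [← h]
    | some disc => rw [hA] at h; simp only [Option.map_some] at h; rw [← h]
  -- rewrite B's fold body through hB
  have hbodyB : order.foldl (fun res t =>
      match (pvBLoop L 0 order PySem.Dict.empty).get? t with
      | some k => res ++ [(List.range k.toNat).map (fun i => ((i : Int), PySem.List.pyGetD t (i : Int) 0))]
      | none => res) []
    = order.foldl (fun res t =>
      match g t with
      | some v => res ++ [v]
      | none => res) [] := by
    apply PySem.List.foldl_congr_mem
    intro acc t ht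
    rw [hB t ht, hg]
    cases hs : pvSearch order t L 1 with
    | none => simp [hs]
    | some j =>
        simp only [hs, Option.map_some]
        rw [show ((j : Nat) : Int).toNat = j from by omega]
        rfl
  show (tuples.foldl _ PySem.Dict.empty).values = _
  rw [hbody]
  show _ = order.foldl _ []
  rw [hbodyB, b_fold_eq g order]
  show (tuples.foldl _ PySem.Dict.empty).items.map Prod.snd = _
  rw [items_foldl_result, List.map_filterMap]
  rw [horder, PySem.List.dedup_eq_ofList]
  congr 1
  funext t
  cases g t <;> simp
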